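-- pv_equiv track=rewrite | github.com/Kavindu80/Phishing-Detection-Platform | backend/src/utils/url_verifier.py | _is_similar_domain
-- ===== SOURCE A (Python) =====
-- def _is_similar_domain(domain1: str, domain2: str) -> bool:
--     """Check if two domains are suspiciously similar (potential homograph attack)"""
--     if domain1 == domain2:
--         return False
--
--     # Check character substitutions
--     substitutions = {
--         'o': '0', 'i': '1', 'l': '1', 'e': '3', 'a': '4', 's': '5'
--     }
--
--     # Create variations of the official domain
--     variations = [domain2]
--     for char, replacement in substitutions.items():
--         if char in domain2:
--             variations.append(domain2.replace(char, replacement))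
--
--     # Check if the suspicious domain matches any variation
--     return domain1 in variations
-- ===== SOURCE B (Python) =====
-- def _is_similar_domain(domain1: str, domain2: str) -> bool:
--     """Check if two domains are suspiciously similar (potential homograph attack)"""
--     substitutions = {
--         'o': '0', 'i': '1', 'l': '1', 'e': '3', 'a': '4', 's': '5'
--     }
--     if domain1 == domain2 or len(domain1) != len(domain2):
--         return False
--     pairs = list(zip(domain1, domain2))
--     diffs = [(a, b) for a, b in pairs if a != b]
--     c = diffs[0][1]
--     if any(b != c or substitutions.get(b) != a for a, b in diffs):
--         return False
--     return all(b != c for a, b in pairs if a == b)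
-- ===== Notes on version B (the rewrite author's own statement) =====
-- stated objective: alternative
-- what changed: Instead of materialising every substituted variation of domain2 and testing membership, B zips the two strings once and checks that all differing positions replace one single source character by its mapped digit and that no occurrence of that character is left unreplaced.
import Mathlib
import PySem

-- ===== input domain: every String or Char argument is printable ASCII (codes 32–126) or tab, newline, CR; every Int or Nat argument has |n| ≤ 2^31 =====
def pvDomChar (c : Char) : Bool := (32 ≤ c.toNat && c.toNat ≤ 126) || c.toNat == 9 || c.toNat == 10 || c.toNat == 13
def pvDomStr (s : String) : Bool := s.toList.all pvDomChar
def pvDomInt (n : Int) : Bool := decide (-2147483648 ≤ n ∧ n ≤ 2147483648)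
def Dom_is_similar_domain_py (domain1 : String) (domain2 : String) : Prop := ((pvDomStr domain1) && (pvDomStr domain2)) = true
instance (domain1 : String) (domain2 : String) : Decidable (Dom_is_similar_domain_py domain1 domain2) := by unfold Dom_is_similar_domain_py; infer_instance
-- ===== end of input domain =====

-- B replaces A's "build every substituted variation of domain2 and test membership" by a single
-- zip scan checking that all differing positions replace one source character by its mapped digit
-- and that no occurrence of it is left unreplaced; same results (alternative decomposition).

-- ===== PORT A =====
def pvSubsA : List (String × String) := [("o","0"),("i","1"),("l","1"),("e","3"),("a","4"),("s","5")]

def is_similar_domain_py (domain1 : String) (domain2 : String) : Bool :=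
  if domain1 == domain2 then false
  else
    let variations := pvSubsA.foldl (fun acc p =>
      if PySem.Str.isIn p.1 domain2 then acc ++ [PySem.Str.replace domain2 p.1 p.2] else acc) [domain2]
    variations.contains domain1

-- ===== PORT B =====
def pvSubsBL : List (Char × Char) := [('o','0'),('i','1'),('l','1'),('e','3'),('a','4'),('s','5')]
def pvSubsB : PySem.Dict Char Char := PySem.Dict.mk pvSubsBL

-- the scan over the zipped pairs and their differing positions (Source B's lines after the guard)
def pvScan (pairs : List (Char × Char)) (diffs : List (Char × Char)) : Bool :=
  match diffs with
  | [] => false   -- unreachable: unequal same-length strings have a differing position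
  | (_, c) :: _ =>
    if diffs.any (fun p => p.2 != c || pvSubsB.get? p.2 != some p.1) then false
    else (pairs.filter (fun p => p.1 == p.2)).all (fun p => p.2 != c)

def is_similar_domain_py_alt (domain1 : String) (domain2 : String) : Bool :=
  if domain1 == domain2 || PySem.Str.len domain1 != PySem.Str.len domain2 then false
  else
    let pairs := domain1.toList.zip domain2.toList
    pvScan pairs (pairs.filter (fun p => p.1 != p.2))

-- ===== PRECONDITION & SPEC =====
def Spec_is_similar_domain_py (domain1 : String) (domain2 : String) (out : Bool) : Prop := out = is_similar_domain_py_alt domain1 domain2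
instance (domain1 : String) (domain2 : String) (out : Bool) : Decidable (Spec_is_similar_domain_py domain1 domain2 out) := by unfold Spec_is_similar_domain_py; infer_instance

-- ===== CLAIM (what is proved, stated in full; the proofs are below) =====
def Claim_equal_is_similar_domain_py : Prop := ∀ (domain1 : String) (domain2 : String), Dom_is_similar_domain_py domain1 domain2 → Spec_is_similar_domain_py domain1 domain2 (is_similar_domain_py domain1 domain2)

-- ===== LEMMAS AND PROOFS =====

-- "replace every occurrence of the single character c by r" as a map
def pvRep (c r : Char) (x : Char) : Char := if x == c then r else x

lemma replace_go_single (c r : Char) : ∀ (fuel : Nat) (l acc : List Char), l.length ≤ fuel →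
    PySem.Chars.replace.go [c] [r] fuel l acc = acc.reverse ++ l.map (pvRep c r)
  | 0, l, acc, h => by
      have hl : l = [] := List.eq_nil_of_length_eq_zero (Nat.le_zero.mp h)
      subst hl; simp [PySem.Chars.replace.go]
  | fuel+1, [], acc, h => by simp [PySem.Chars.replace.go]
  | fuel+1, x :: t, acc, h => by
      have ht : t.length ≤ fuel := by simpa using Nat.le_of_succ_le_succ h
      have hgo : PySem.Chars.replace.go [c] [r] (fuel+1) (x :: t) acc
          = if List.isPrefixOf [c] (x :: t) = true
            then PySem.Chars.replace.go [c] [r] fuel (List.drop (1:Nat) (x::t)) ([r].reverse ++ acc)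
            else PySem.Chars.replace.go [c] [r] fuel t (x :: acc) := rfl
      rw [hgo]
      by_cases hx : x = c
      · have hpre : List.isPrefixOf [c] (x :: t) = true := by simp [List.isPrefixOf, hx]
        rw [if_pos hpre]
        simp only [List.drop_succ_cons, List.drop_zero, List.reverse_singleton, List.singleton_append]
        rw [replace_go_single c r fuel t (r :: acc) ht]
        simp [pvRep, hx]
      · have hpre : List.isPrefixOf [c] (x :: t) = false := by
          simp only [List.isPrefixOf, Bool.and_true]
          exact beq_eq_false_iff_ne.mpr (fun hcx => hx hcx.symm)
        rw [if_neg (by simp [hpre])]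
        rw [replace_go_single c r fuel t (x :: acc) ht]
        simp [pvRep, hx]

lemma replace_single (l : List Char) (c r : Char) :
    PySem.Chars.replace l [c] [r] = l.map (pvRep c r) := by
  have h0 : PySem.Chars.replace l [c] [r] = PySem.Chars.replace.go [c] [r] l.length l [] := rfl
  rw [h0, replace_go_single c r l.length l [] le_rfl]
  simp

lemma str_replace_single (d1 d2 s1 s2 : String) (c r : Char)
    (h1 : s1.toList = [c]) (h2 : s2.toList = [r]) :
    d1 = PySem.Str.replace d2 s1 s2 ↔ d1.toList = d2.toList.map (pvRep c r) := by
  have hx : (PySem.Str.replace d2 s1 s2).toList = d2.toList.map (pvRep c r) := by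
    rw [PySem.Str.toList_replace, h1, h2, replace_single]
  constructor
  · intro h; rw [h]; exact hx
  · intro h; exact String.ext (h.trans hx.symm)

lemma singleton_infix (a : Char) (l : List Char) : [a] <:+: l ↔ a ∈ l := by
  constructor
  · intro h; exact List.singleton_sublist.mp h.sublist
  · intro h
    obtain ⟨s, t, rfl⟩ := List.append_of_mem h
    exact ⟨s, t, by simp⟩

lemma isIn_single (s d2 : String) (c : Char) (h : s.toList = [c]) :
    PySem.Str.isIn s d2 = true ↔ c ∈ d2.toList := by
  rw [PySem.Str.isIn_iff_infix, h, singleton_infix]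

-- characterisation of the port of A
lemma A_iff (d1 d2 : String) : is_similar_domain_py d1 d2 = true ↔
    (d1 ≠ d2 ∧ ∃ p ∈ pvSubsA, PySem.Str.isIn p.1 d2 = true ∧ d1 = PySem.Str.replace d2 p.1 p.2) := by
  by_cases h : d1 = d2
  · subst h; simp [is_similar_domain_py]
  · have hb : (d1 == d2) = false := by simp [h]
    simp only [is_similar_domain_py, hb, Bool.false_eq_true, if_false]
    rw [PySem.List.foldl_append_if (fun q => PySem.Str.isIn q.1 d2)
          (fun q => PySem.Str.replace d2 q.1 q.2) pvSubsA [d2]]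
    rw [List.contains_iff_mem, List.singleton_append, List.mem_cons]
    constructor
    · rintro (rfl | hm)
      · exact absurd rfl h
      · refine ⟨h, ?_⟩
        obtain ⟨q, hq, rfl⟩ := List.mem_map.mp hm
        obtain ⟨hq1, hq2⟩ := List.mem_filter.mp hq
        exact ⟨q, hq1, hq2, rfl⟩
    · rintro ⟨-, q, hq1, hq2, rfl⟩
      exact Or.inr (List.mem_map.mpr ⟨q, List.mem_filter.mpr ⟨hq1, hq2⟩, rfl⟩)

lemma get?_pvSubsB (c r : Char) : pvSubsB.get? c = some r ↔ (c, r) ∈ pvSubsBL := by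
  by_cases h1 : c = 'o'
  · subst h1; rw [show pvSubsB.get? 'o' = some '0' from rfl]; simp [pvSubsBL, eq_comm]
  by_cases h2 : c = 'i'
  · subst h2; rw [show pvSubsB.get? 'i' = some '1' from rfl]; simp [pvSubsBL, eq_comm]
  by_cases h3 : c = 'l'
  · subst h3; rw [show pvSubsB.get? 'l' = some '1' from rfl]; simp [pvSubsBL, eq_comm]
  by_cases h4 : c = 'e'
  · subst h4; rw [show pvSubsB.get? 'e' = some '3' from rfl]; simp [pvSubsBL, eq_comm]
  by_cases h5 : c = 'a'
  · subst h5; rw [show pvSubsB.get? 'a' = some '4' from rfl]; simp [pvSubsBL, eq_comm]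
  by_cases h6 : c = 's'
  · subst h6; rw [show pvSubsB.get? 's' = some '5' from rfl]; simp [pvSubsBL, eq_comm]
  · have hg : pvSubsB.get? c = none := by
      simp only [pvSubsB, pvSubsBL, PySem.Dict.get?]
      simp [List.find?,
        show ('o' == c) = false from beq_eq_false_iff_ne.mpr (Ne.symm h1),
        show ('i' == c) = false from beq_eq_false_iff_ne.mpr (Ne.symm h2),
        show ('l' == c) = false from beq_eq_false_iff_ne.mpr (Ne.symm h3),
        show ('e' == c) = false from beq_eq_false_iff_ne.mpr (Ne.symm h4),
        show ('a' == c) = false from beq_eq_false_iff_ne.mpr (Ne.symm h5),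
        show ('s' == c) = false from beq_eq_false_iff_ne.mpr (Ne.symm h6)]
    rw [hg]
    simp [pvSubsBL, h1, h2, h3, h4, h5, h6]

lemma mem_pvSubsBL_ne (c r : Char) (h : (c, r) ∈ pvSubsBL) : c ≠ r := by
  simp only [pvSubsBL, List.mem_cons, List.not_mem_nil, or_false, Prod.mk.injEq] at h
  rcases h with ⟨rfl, rfl⟩ | ⟨rfl, rfl⟩ | ⟨rfl, rfl⟩ | ⟨rfl, rfl⟩ | ⟨rfl, rfl⟩ | ⟨rfl, rfl⟩ <;> decide

-- characterisation of the port of B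
lemma B_iff (d1 d2 : String) : is_similar_domain_py_alt d1 d2 = true ↔
    (d1 ≠ d2 ∧ ∃ c r, (c, r) ∈ pvSubsBL ∧ c ∈ d2.toList ∧ d1.toList = d2.toList.map (pvRep c r)) := by
  by_cases heq : d1 = d2
  · subst heq; simp [is_similar_domain_py_alt]
  by_cases hlen : d1.toList.length = d2.toList.length
  case neg =>
    have hg : (d1 == d2 || PySem.Str.len d1 != PySem.Str.len d2) = true := by
      have h3 : ¬ d1.length = d2.length := by
        intro hh
        exact hlen (by rw [String.length_toList, String.length_toList]; exact hh)
      simp [PySem.Str.len_eq, h3]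
    simp only [is_similar_domain_py_alt, hg, if_true]
    constructor
    · intro hh; exact absurd hh (by simp)
    · rintro ⟨-, c, r, -, -, hm⟩
      exact absurd (by rw [hm, List.length_map]) hlen
  case pos =>
    have hg : (d1 == d2 || PySem.Str.len d1 != PySem.Str.len d2) = false := by
      simp [heq, PySem.Str.len_eq, hlen]
    simp only [is_similar_domain_py_alt, hg, Bool.false_eq_true, if_false,
      ne_eq, heq, not_false_eq_true, true_and]
    constructor
    · intro h
      cases hfil : (d1.toList.zip d2.toList).filter (fun p => p.1 != p.2) with
      | nil => rw [hfil] at h; simp [pvScan] at h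
      | cons hd rest =>
        obtain ⟨a0, c0⟩ := hd
        rw [hfil] at h
        simp only [pvScan] at h
        cases hany : (((a0, c0) :: rest).any (fun p => p.2 != c0 || pvSubsB.get? p.2 != some p.1)) with
        | true => simp [hany] at h
        | false =>
          simp only [hany, Bool.false_eq_true, if_false] at h
          have hanyf : ∀ p ∈ (a0, c0) :: rest, p.2 = c0 ∧ pvSubsB.get? p.2 = some p.1 := by
            intro p hp
            have h' := List.any_eq_false.mp hany p hp
            simpa using h'
          have hget : pvSubsB.get? c0 = some a0 := by
            have := (hanyf (a0, c0) List.mem_cons_self).2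
            simpa using this
          have hmemhd : (a0, c0) ∈ (d1.toList.zip d2.toList).filter (fun p => p.1 != p.2) := by
            rw [hfil]; exact List.mem_cons_self
          have hc0 : c0 ∈ d2.toList :=
            (List.of_mem_zip (List.mem_of_mem_filter hmemhd)).2
          refine ⟨c0, a0, (get?_pvSubsB c0 a0).mp hget, hc0, ?_⟩
          apply List.ext_getElem (by rw [List.length_map]; exact hlen)
          intro i hi1 hi2
          have hM : i < d2.toList.length := by rw [List.length_map] at hi2; exact hi2
          have hzlen : i < (d1.toList.zip d2.toList).length := by rw [List.length_zip]; omega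
          have hz : (d1.toList[i]'hi1, d2.toList[i]'hM) ∈ d1.toList.zip d2.toList := by
            have := List.getElem_mem hzlen
            rwa [List.getElem_zip] at this
          rw [List.getElem_map]
          by_cases hface : d1.toList[i]'hi1 = d2.toList[i]'hM
          · have hmemeq : (d1.toList[i]'hi1, d2.toList[i]'hM) ∈
                (d1.toList.zip d2.toList).filter (fun p => p.1 == p.2) :=
              List.mem_filter.mpr ⟨hz, by simpa using hface⟩
            have hne : d2.toList[i]'hM ≠ c0 := by
              have := List.all_eq_true.mp h _ hmemeq
              simpa using this
            simp [pvRep, hne, hface]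
          · have hmemd : (d1.toList[i]'hi1, d2.toList[i]'hM) ∈ (a0, c0) :: rest := by
              rw [← hfil]
              exact List.mem_filter.mpr ⟨hz, by simpa using hface⟩
            obtain ⟨h2c, h2g⟩ := hanyf _ hmemd
            simp only at h2c h2g
            rw [h2c, hget] at h2g
            have ha : a0 = d1.toList[i]'hi1 := by injection h2g
            rw [h2c, ← ha]
            simp [pvRep]
    · rintro ⟨c, r, hmem, hc, hmap⟩
      have hcr : c ≠ r := mem_pvSubsBL_ne c r hmem
      have hrc : r ≠ c := Ne.symm hcr
      have hget : pvSubsB.get? c = some r := (get?_pvSubsB c r).mpr hmem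
      have hpairs : d1.toList.zip d2.toList = d2.toList.map (fun x => (pvRep c r x, x)) := by
        rw [hmap]
        calc (d2.toList.map (pvRep c r)).zip d2.toList
            = (d2.toList.map (pvRep c r)).zip (d2.toList.map id) := by rw [List.map_id]
          _ = d2.toList.map (fun x => (pvRep c r x, id x)) := List.zip_map'
          _ = d2.toList.map (fun x => (pvRep c r x, x)) := rfl
      have hfeq : ∀ x ∈ d2.toList,
          ((fun p : Char × Char => p.1 != p.2) ∘ (fun x => (pvRep c r x, x))) x = (x == c) := by
        intro y _
        by_cases hy : y = c
        · rw [hy]; simp [pvRep, hrc]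
        · simp [pvRep, hy]
      have hfilter : (d1.toList.zip d2.toList).filter (fun p => p.1 != p.2)
          = (d2.toList.filter (fun x => x == c)).map (fun x => (pvRep c r x, x)) := by
        rw [hpairs, List.filter_map, List.filter_congr hfeq]
      have hcf : c ∈ d2.toList.filter (fun x => x == c) := List.mem_filter.mpr ⟨hc, by simp⟩
      cases hfc : d2.toList.filter (fun x => x == c) with
      | nil => rw [hfc] at hcf; simp at hcf
      | cons y ys =>
        have hyc : y = c := by
          have hy : y ∈ d2.toList.filter (fun x => x == c) := by
            rw [hfc]; exact List.mem_cons_self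
          simpa using (List.mem_filter.mp hy).2
        rw [hyc] at hfc
        have hpv : pvRep c r c = r := by simp [pvRep]
        rw [hfilter, hfc, List.map_cons, hpv]
        simp only [pvScan]
        have hany : (((r, c) :: ys.map (fun x => (pvRep c r x, x))).any
            (fun p => p.2 != c || pvSubsB.get? p.2 != some p.1)) = false := by
          apply List.any_eq_false.mpr
          intro p hp
          have hpval : p = (r, c) := by
            rcases List.mem_cons.mp hp with h | h
            · exact h
            · obtain ⟨y', hy', rfl⟩ := List.mem_map.mp h
              have hy'c : y' = c := by
                have : y' ∈ d2.toList.filter (fun x => x == c) := by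
                  rw [hfc]; exact List.mem_cons_of_mem _ hy'
                simpa using (List.mem_filter.mp this).2
              rw [hy'c, hpv]
          rw [hpval]
          simp [hget]
        rw [hany]
        simp only [Bool.false_eq_true, if_false]
        rw [hpairs, List.filter_map]
        apply List.all_eq_true.mpr
        intro p hp
        obtain ⟨y', hy', rfl⟩ := List.mem_map.mp hp
        have hyy : pvRep c r y' = y' := by
          simpa using (List.mem_filter.mp hy').2
        have hy'ne : y' ≠ c := by
          intro hyc'
          rw [hyc', hpv] at hyy
          exact hrc hyy
        simpa using hy'ne

-- the two existential forms coincide pair by pair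
lemma AB_iff (d1 d2 : String) :
    (∃ p ∈ pvSubsA, PySem.Str.isIn p.1 d2 = true ∧ d1 = PySem.Str.replace d2 p.1 p.2) ↔
    (∃ c r, (c, r) ∈ pvSubsBL ∧ c ∈ d2.toList ∧ d1.toList = d2.toList.map (pvRep c r)) := by
  have key : ∀ (s1 s2 : String) (c r : Char), s1.toList = [c] → s2.toList = [r] →
      ((PySem.Str.isIn s1 d2 = true ∧ d1 = PySem.Str.replace d2 s1 s2) ↔
        (c ∈ d2.toList ∧ d1.toList = d2.toList.map (pvRep c r))) := by
    intro s1 s2 c r h1 h2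
    exact and_congr (isIn_single s1 d2 c h1) (str_replace_single d1 d2 s1 s2 c r h1 h2)
  simp only [pvSubsA, pvSubsBL, List.mem_cons, List.not_mem_nil, or_false, Prod.mk.injEq]
  constructor
  · rintro ⟨p, hp, hcond⟩
    rcases hp with rfl | rfl | rfl | rfl | rfl | rfl
    · exact ⟨'o', '0', Or.inl ⟨rfl, rfl⟩, (key _ _ _ _ rfl rfl).mp hcond⟩
    · exact ⟨'i', '1', Or.inr (Or.inl ⟨rfl, rfl⟩), (key _ _ _ _ rfl rfl).mp hcond⟩
    · exact ⟨'l', '1', Or.inr (Or.inr (Or.inl ⟨rfl, rfl⟩)), (key _ _ _ _ rfl rfl).mp hcond⟩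
    · exact ⟨'e', '3', Or.inr (Or.inr (Or.inr (Or.inl ⟨rfl, rfl⟩))), (key _ _ _ _ rfl rfl).mp hcond⟩
    · exact ⟨'a', '4', Or.inr (Or.inr (Or.inr (Or.inr (Or.inl ⟨rfl, rfl⟩)))), (key _ _ _ _ rfl rfl).mp hcond⟩
    · exact ⟨'s', '5', Or.inr (Or.inr (Or.inr (Or.inr (Or.inr ⟨rfl, rfl⟩)))), (key _ _ _ _ rfl rfl).mp hcond⟩
  · rintro ⟨c, r, hp, hcond⟩
    rcases hp with ⟨rfl, rfl⟩ | ⟨rfl, rfl⟩ | ⟨rfl, rfl⟩ | ⟨rfl, rfl⟩ | ⟨rfl, rfl⟩ | ⟨rfl, rfl⟩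
    · exact ⟨("o","0"), Or.inl rfl, (key _ _ _ _ rfl rfl).mpr hcond⟩
    · exact ⟨("i","1"), Or.inr (Or.inl rfl), (key _ _ _ _ rfl rfl).mpr hcond⟩
    · exact ⟨("l","1"), Or.inr (Or.inr (Or.inl rfl)), (key _ _ _ _ rfl rfl).mpr hcond⟩
    · exact ⟨("e","3"), Or.inr (Or.inr (Or.inr (Or.inl rfl))), (key _ _ _ _ rfl rfl).mpr hcond⟩
    · exact ⟨("a","4"), Or.inr (Or.inr (Or.inr (Or.inr (Or.inl rfl)))), (key _ _ _ _ rfl rfl).mpr hcond⟩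
    · exact ⟨("s","5"), Or.inr (Or.inr (Or.inr (Or.inr (Or.inr rfl)))), (key _ _ _ _ rfl rfl).mpr hcond⟩

-- ===== VERDICT (by name: the statement is the Claim_ definition above) =====
theorem is_similar_domain_py_spec : Claim_equal_is_similar_domain_py := by
  unfold Claim_equal_is_similar_domain_py Spec_is_similar_domain_py
  intro d1 d2 _
  rw [Bool.eq_iff_iff, A_iff, B_iff]
  exact and_congr Iff.rfl (AB_iff d1 d2)
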